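-- pv_equiv track=rewrite | github.com/403summer/CODING | 프로그래머스/lv0/120815. 피자 나눠 먹기 （2）/피자 나눠 먹기 （2）.py | solution
-- ===== SOURCE A (Python) =====
-- def solution(n):
--     i = 1
--     while True:
--         if (6*i)%n == 0:
--             answer = i
--             break
--         i += 1
--     return answer
-- ===== SOURCE B (Python) =====
-- def solution(n):
--     # closed form: smallest i with n | 6*i is |n| / gcd(6, |n|)
--     a, b = 6, abs(n)
--     while b:
--         a, b = b, a % b
--     return abs(n) // a
-- ===== Notes on version B (the rewrite author's own statement) =====
-- stated objective: simpler
-- what changed: Replaces the unbounded linear search for the smallest i with 6*i divisible by n by the closed form |n| // gcd(6,|n|), with gcd computed by an explicit Euclidean loop.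
-- outside the precondition, e.g. on solution(0): A raises ZeroDivisionError, B returns 0
import Mathlib
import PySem

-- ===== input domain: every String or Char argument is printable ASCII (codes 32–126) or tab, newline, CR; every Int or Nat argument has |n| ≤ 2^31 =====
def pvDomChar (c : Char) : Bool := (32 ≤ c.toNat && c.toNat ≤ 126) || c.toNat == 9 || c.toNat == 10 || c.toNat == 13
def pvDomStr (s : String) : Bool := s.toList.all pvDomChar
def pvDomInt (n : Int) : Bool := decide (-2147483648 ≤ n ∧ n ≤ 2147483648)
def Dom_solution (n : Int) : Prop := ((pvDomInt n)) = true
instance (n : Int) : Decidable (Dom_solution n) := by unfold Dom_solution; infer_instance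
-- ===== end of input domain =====

-- B replaces A's unbounded linear search for the smallest i with n | 6*i by the
-- closed form |n| // gcd(6,|n|) (gcd via an explicit Euclidean loop): simpler and faster.

-- ===== PORT A =====
-- A's 'while True' search; the fuel n.natAbs is only a totality guard: for n ≠ 0 the
-- answer is found at some i ≤ |n|, so the fuel is never exhausted inside Pre_.
def solutionLoop (n : Int) : Nat → Int → Int
  | 0, i => i
  | f + 1, i => if PySem.Int.mod (6 * i) n = 0 then i else solutionLoop n f (i + 1)

def solution (n : Int) : Int := solutionLoop n n.natAbs 1

-- ===== PORT B =====
-- Euclidean loop: a, b = 6, abs(n); while b: a, b = b, a % b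
def euclidLoop (a b : Int) : Int :=
  if _h : b = 0 then a else euclidLoop b (PySem.Int.mod a b)
termination_by b.natAbs
decreasing_by
  rcases lt_or_gt_of_ne _h with hb | hb
  · have h2 := PySem.Int.mod_neg_bounds (a := a) (b := b) hb
    omega
  · have h2 := PySem.Int.mod_lt (a := a) (b := b) hb
    have h3 := PySem.Int.mod_nonneg (a := a) (b := b) hb
    omega

def solution_alt (n : Int) : Int := PySem.Int.floordiv |n| (euclidLoop 6 |n|)

-- ===== PRECONDITION & SPEC =====
-- Pre_ excludes exactly n = 0, where A raises ZeroDivisionError at the first modulo.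
def Pre_solution (n : Int) : Prop := n ≠ 0
instance (n : Int) : Decidable (Pre_solution n) := by unfold Pre_solution; infer_instance
def pvWitness_solution : Int := (10)

def Spec_solution (n : Int) (out : Int) : Prop := out = solution_alt n
instance (n : Int) (out : Int) : Decidable (Spec_solution n out) := by unfold Spec_solution; infer_instance

-- ===== CLAIM (what is proved, stated in full; the proofs are below) =====
def Claim_equal_solution : Prop := ∀ (n : Int), Dom_solution n → Pre_solution n → Spec_solution n (solution n)

-- ===== LEMMAS AND PROOFS =====

-- The Euclidean loop on Nat casts computes Nat.gcd.
theorem euclidLoop_natCast : ∀ (b a : Nat), euclidLoop (a : Int) (b : Int) = (Nat.gcd a b : Int) := by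
  intro b
  induction b using Nat.strong_induction_on with
  | _ b ih =>
    intro a
    rw [euclidLoop]
    by_cases hb : b = 0
    · subst hb; simp
    · have hb' : (0 : Int) < (b : Int) := by exact_mod_cast Nat.pos_of_ne_zero hb
      rw [dif_neg (by exact_mod_cast hb)]
      rw [PySem.Int.mod_natCast]
      rw [ih (a % b) (Nat.mod_lt _ (Nat.pos_of_ne_zero hb)) b]
      rw [Nat.gcd_comm b (a % b), ← Nat.gcd_rec, Nat.gcd_comm b a]

-- The search loop returns k if k is the first hit at or after i and the fuel reaches it.
theorem solutionLoop_eq (n k : Int) (hk : PySem.Int.mod (6 * k) n = 0)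
    (hmin : ∀ j, 1 ≤ j → j < k → PySem.Int.mod (6 * j) n ≠ 0) :
    ∀ (f : Nat) (i : Int), 1 ≤ i → i ≤ k → k < i + f →
      solutionLoop n f i = k := by
  intro f
  induction f with
  | zero => intro i _ h2 h3; omega
  | succ f ih =>
    intro i h1 h2 h3
    rw [solutionLoop]
    by_cases hp : PySem.Int.mod (6 * i) n = 0
    · rw [if_pos hp]
      by_contra hne
      exact hmin i h1 (lt_of_le_of_ne h2 hne) hp
    · rw [if_neg hp]
      have hik : i ≠ k := fun h => hp (h ▸ hk)
      exact ih (i + 1) (by omega) (by omega) (by omega)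

-- For m > 0, m / gcd 6 m is the least positive j with m ∣ 6 * j.
theorem dvd_six_mul_div_gcd (m : Nat) (_hm : 0 < m) :
    m ∣ 6 * (m / Nat.gcd 6 m) := by
  obtain ⟨c, hc⟩ := Nat.gcd_dvd_left 6 m
  have heq : 6 * (m / Nat.gcd 6 m) = c * m := by
    calc 6 * (m / Nat.gcd 6 m) = Nat.gcd 6 m * (m / Nat.gcd 6 m) * c := by nth_rewrite 1 [hc]; ring
      _ = m * c := by rw [Nat.mul_div_cancel' (Nat.gcd_dvd_right 6 m)]
      _ = c * m := Nat.mul_comm _ _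
  rw [heq]
  exact dvd_mul_left m c

theorem div_gcd_dvd_of_dvd (m j : Nat) (_hm : 0 < m) (h : m ∣ 6 * j) :
    m / Nat.gcd 6 m ∣ j := by
  set g := Nat.gcd 6 m with hg
  have hgpos : 0 < g := Nat.gcd_pos_of_pos_left _ (by norm_num)
  have hco : Nat.Coprime (6 / g) (m / g) := Nat.coprime_div_gcd_div_gcd hgpos
  have h6 : g * (6 / g) = 6 := Nat.mul_div_cancel' (Nat.gcd_dvd_left 6 m)
  have hmg : g * (m / g) = m := Nat.mul_div_cancel' (Nat.gcd_dvd_right 6 m)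
  have h2 : g * (m / g) ∣ g * ((6 / g) * j) := by
    rw [hmg, ← Nat.mul_assoc, h6]; exact h
  have h3 : m / g ∣ (6 / g) * j := (Nat.mul_dvd_mul_iff_left hgpos).mp h2
  exact hco.symm.dvd_of_dvd_mul_left h3

-- ===== VERDICT (by name: the statement is the Claim_ definition above) =====
theorem solution_spec : Claim_equal_solution := by
  intro n _ hn
  unfold Spec_solution solution solution_alt
  set m := n.natAbs with hmdef
  have hm : 0 < m := Int.natAbs_pos.mpr hn
  set g := Nat.gcd 6 m with hg
  have hgpos : 0 < g := Nat.gcd_pos_of_pos_left _ (by norm_num)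
  have habs : |n| = (m : Int) := Int.abs_eq_natAbs n
  -- the B side evaluates to the closed form
  have hB : PySem.Int.floordiv |n| (euclidLoop 6 |n|) = ((m / g : Nat) : Int) := by
    rw [habs]
    have h6 : ((6 : Nat) : Int) = (6 : Int) := by norm_num
    rw [← h6, euclidLoop_natCast m 6, PySem.Int.floordiv_natCast]
  rw [hB]
  -- the A side finds the same value as least hit
  set k := m / g with hk
  have hkd : m ∣ 6 * k := dvd_six_mul_div_gcd m hm
  have hkpos : 0 < k := Nat.div_pos (Nat.le_of_dvd hm (Nat.gcd_dvd_right 6 m)) hgpos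
  apply solutionLoop_eq n (k : Int)
  · rw [PySem.Int.mod_eq_zero_iff_dvd]
    apply Int.natAbs_dvd.mp
    show ((m : Int)) ∣ 6 * (k : Int)
    exact_mod_cast hkd
  · intro j h1 h2 hmod
    rw [PySem.Int.mod_eq_zero_iff_dvd] at hmod
    have hjd : (m : Int) ∣ 6 * j := Int.natAbs_dvd.mpr hmod
    have hj0 : 0 ≤ j := by omega
    obtain ⟨jn, rfl⟩ := Int.eq_ofNat_of_zero_le hj0
    have hjn : m ∣ 6 * jn := by
      have : ((6 * jn : Nat) : Int) = 6 * (jn : Int) := by push_cast; ring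
      exact_mod_cast hjd
    have := div_gcd_dvd_of_dvd m jn hm hjn
    have hjpos : 0 < jn := by exact_mod_cast h1
    have : k ≤ jn := Nat.le_of_dvd hjpos this
    have : (k : Int) ≤ (jn : Int) := by exact_mod_cast this
    omega
  · exact le_refl 1
  · exact_mod_cast hkpos
  · have h := Nat.div_le_self m g
    have hle : (k : Int) ≤ (m : Int) := by exact_mod_cast h
    omega
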